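-- pv_equiv track=rewrite | github.com/ptktmsz/CS50P | part2/plates/plates.py | numbersend
-- ===== SOURCE A (Python) =====
-- def numbersend(s):
--     for c in s:
--         if c.isnumeric() == True:
--             firstnumber = c
--             if s[s.index(firstnumber):len(s)].isnumeric() == True:
--                 return True
--             else:
--                 return False
-- ===== SOURCE B (Python) =====
-- def numbersend(s):
--     seen = False
--     for c in s:
--         if c.isnumeric():
--             seen = True
--         elif seen:
--             return False
--     return True if seen else None
-- ===== Notes on version B (the rewrite author's own statement) =====
-- stated objective: simpler
-- what changed: Replaces the find-first-digit + index + slice + whole-suffix isnumeric check with a single one-pass state machine carrying a seen_number flag and no s.index or substring.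
import Mathlib
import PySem

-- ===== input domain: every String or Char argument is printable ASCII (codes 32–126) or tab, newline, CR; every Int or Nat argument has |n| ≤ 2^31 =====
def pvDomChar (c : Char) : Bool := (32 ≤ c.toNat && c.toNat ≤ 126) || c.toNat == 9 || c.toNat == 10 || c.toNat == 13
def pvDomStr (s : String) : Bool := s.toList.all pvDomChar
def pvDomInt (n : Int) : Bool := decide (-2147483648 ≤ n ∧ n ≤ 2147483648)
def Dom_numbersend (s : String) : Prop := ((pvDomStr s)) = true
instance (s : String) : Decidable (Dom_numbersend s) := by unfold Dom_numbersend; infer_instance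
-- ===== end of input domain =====

-- B replaces A's find-first-digit + s.index + slice + suffix isnumeric with one linear pass
-- carrying a seen_number flag (objective: simpler).
-- On the ASCII input domain Python's c.isnumeric()/str.isnumeric() coincide with isdigit,
-- so both ports use PySem.Chars.isdigit / strIsdigit (exact on Dom).

-- ===== PORT A =====
-- 'for c in s: if c.isnumeric(): firstnumber = c; return s[s.index(firstnumber):len(s)].isnumeric()'
def numbersendALoop (full : List Char) : List Char → Option Bool
  | [] => none
  | c :: rest =>
    if PySem.Chars.isdigit c = true then
      -- firstnumber = c; s.index(firstnumber) (c ∈ s here, so .index = find); s[idx:len(s)].isnumeric()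
      if PySem.Chars.strIsdigit
           (PySem.Chars.slice full (some (PySem.Chars.find full [c]))
             (some (PySem.Chars.len full))) = true
      then some true else some false
    else numbersendALoop full rest

def numbersend (s : String) : Option Bool := numbersendALoop s.toList s.toList

-- ===== PORT B =====
def numbersendBLoop : List Char → Bool → Option Bool
  | [], seen => if seen then some true else none
  | c :: rest, seen =>
    if PySem.Chars.isdigit c = true then numbersendBLoop rest true
    else if seen then some false else numbersendBLoop rest seen

def numbersend_alt (s : String) : Option Bool := numbersendBLoop s.toList false

-- ===== PRECONDITION & SPEC =====
def Spec_numbersend (s : String) (out : Option Bool) : Prop := out = numbersend_alt s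
instance (s : String) (out : Option Bool) : Decidable (Spec_numbersend s out) := by unfold Spec_numbersend; infer_instance

-- ===== CLAIM (what is proved, stated in full; the proofs are below) =====
def Claim_equal_numbersend : Prop := ∀ (s : String), Dom_numbersend s → Spec_numbersend s (numbersend s)

-- ===== LEMMAS AND PROOFS =====

-- with seen_number already set, B returns whether every remaining char is a digit
theorem numbersendBLoop_true (l : List Char) :
    numbersendBLoop l true = some (l.all PySem.Chars.isdigit) := by
  induction l with
  | nil => rfl
  | cons c rest ih =>
    by_cases h : PySem.Chars.isdigit c = true <;>
      simp [numbersendBLoop, h, ih]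

theorem find_go_singleton (c : Char) (p rest : List Char) (hc : c ∉ p) (k : Nat) :
    PySem.Chars.find.go [c] (p ++ c :: rest) k = ((k + p.length : Nat) : Int) := by
  induction p generalizing k with
  | nil => simp [PySem.Chars.find.go, List.isPrefixOf]
  | cons x t ih =>
    have hx : x ≠ c := fun h => hc (h ▸ List.mem_cons_self ..)
    have hpre : ¬ ([c].isPrefixOf (x :: (t ++ c :: rest)) = true) := by
      simp [List.isPrefixOf]; exact fun h => (hx h.symm).elim
    show PySem.Chars.find.go [c] (x :: (t ++ c :: rest)) k = _
    rw [PySem.Chars.find.go, if_neg hpre,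
        ih (fun h => hc (List.mem_cons_of_mem _ h)) (k + 1)]
    simp only [List.length_cons]; push_cast; ring

theorem find_singleton (c : Char) (p rest : List Char) (hc : c ∉ p) :
    PySem.Chars.find (p ++ c :: rest) [c] = (p.length : Int) := by
  have := find_go_singleton c p rest hc 0
  simpa [PySem.Chars.find] using this

-- main invariant: A's loop on the remaining suffix, with the processed prefix all non-digit,
-- agrees with B's loop started with seen_number = False
theorem loop_agree (l p : List Char) (hp : ∀ x ∈ p, PySem.Chars.isdigit x = false) :
    numbersendALoop (p ++ l) l = numbersendBLoop l false := by
  induction l generalizing p with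
  | nil => rfl
  | cons c rest ih =>
    by_cases h : PySem.Chars.isdigit c = true
    · have hc : c ∉ p := fun hm => by simp [hp c hm] at h
      have hfind := find_singleton c p rest hc
      have hslice : PySem.List.slice (p ++ c :: rest) (some (p.length : Int))
          (some (PySem.Chars.len (p ++ c :: rest))) = c :: rest := by
        rw [PySem.Chars.len_eq, PySem.List.slice_natCast, List.drop_left]
        simp
      simp only [numbersendALoop, h, if_pos, hfind, PySem.Chars.slice_eq_listSlice, hslice]
      rw [numbersendBLoop]
      simp only [h, if_pos, numbersendBLoop_true]
      by_cases hb : rest.all PySem.Chars.isdigit = true <;>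
        simp [PySem.Chars.strIsdigit, h, hb]
    · have hp' : ∀ x ∈ p ++ [c], PySem.Chars.isdigit x = false := by
        intro x hx
        rcases List.mem_append.1 hx with hx | hx
        · exact hp x hx
        · simp at hx; subst hx; simpa using h
      have := ih (p ++ [c]) hp'
      simp only [List.append_assoc, List.singleton_append] at this
      simp [numbersendALoop, numbersendBLoop, h, this]

-- ===== VERDICT (by name: the statement is the Claim_ definition above) =====
theorem numbersend_spec : Claim_equal_numbersend := by
  intro s _
  unfold Spec_numbersend numbersend numbersend_alt
  simpa using loop_agree s.toList [] (by simp)
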